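-- pv_equiv track=rewrite | github.com/tom-cat-mao/maze-game | backend/app/algorithms/pathfinder_dp.py | _build_branch_excursion
-- ===== SOURCE A (Python) =====
-- def _build_branch_excursion(u, parent, graph, path_decision_memo):
--     """
--     Recursively builds the path for an excursion into a side branch.
--     """
--     path = [u]
--     decisions = path_decision_memo.get(u, {})
--     for v, should_explore in decisions.items():
--         if should_explore:
--             sub_branch_path = _build_branch_excursion(v, u, graph, path_decision_memo)
--             path.extend(sub_branch_path)
--             path.append(u) # Backtrack to u
--     return path
-- ===== SOURCE B (Python) =====
-- def _build_branch_excursion(u, parent, graph, path_decision_memo):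
--     # Iterative DFS with an explicit work stack of (is_visit, node) tokens:
--     # a visit token emits the node and schedules its should_explore children
--     # (each followed by an emit token for the backtrack step); an emit token
--     # just appends the node.  Same output, no recursion.
--     out = []
--     work = [(True, u)]
--     while work:
--         is_visit, x = work.pop()
--         out.append(x)
--         if is_visit:
--             items = list(path_decision_memo.get(x, {}).items())
--             for v, ok in reversed(items):
--                 if ok:
--                     work.append((False, x))
--                     work.append((True, v))
--     return out
-- ===== Notes on version B (the rewrite author's own statement) =====
-- stated objective: alternative
-- what changed: Replaces A's recursion with an iterative DFS: a while loop over an explicit stack of visit/emit tokens, where backtrack steps are pre-scheduled as emit tokens instead of being appended after each recursive call.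
import Mathlib
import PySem

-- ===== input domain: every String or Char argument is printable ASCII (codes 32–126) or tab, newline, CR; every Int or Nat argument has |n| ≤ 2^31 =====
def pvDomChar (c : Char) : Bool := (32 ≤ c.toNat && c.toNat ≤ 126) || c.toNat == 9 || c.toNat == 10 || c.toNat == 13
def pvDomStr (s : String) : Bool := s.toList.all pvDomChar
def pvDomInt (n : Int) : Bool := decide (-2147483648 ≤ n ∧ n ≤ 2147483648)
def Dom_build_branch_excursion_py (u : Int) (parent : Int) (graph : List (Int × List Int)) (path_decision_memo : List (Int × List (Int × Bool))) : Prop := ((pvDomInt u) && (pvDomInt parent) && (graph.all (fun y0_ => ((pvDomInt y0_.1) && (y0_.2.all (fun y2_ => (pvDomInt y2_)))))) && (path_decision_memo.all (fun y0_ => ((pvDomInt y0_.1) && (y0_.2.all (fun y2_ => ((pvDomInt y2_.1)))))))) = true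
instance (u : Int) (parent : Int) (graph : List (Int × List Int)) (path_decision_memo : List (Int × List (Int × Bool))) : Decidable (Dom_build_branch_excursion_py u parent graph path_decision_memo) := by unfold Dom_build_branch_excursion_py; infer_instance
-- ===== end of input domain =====

-- B replaces A's recursion by an iterative DFS over an explicit stack of visit/emit
-- tokens (objective: alternative decomposition, same output); both Lean ports are
-- totalized with a depth budget that is irrelevant on Pre_ inputs.

-- ===== PORT A =====
-- `path_decision_memo.get(x, {})`: first match in the association list
def pvGet (memo : List (Int × List (Int × Bool))) (x : Int) : List (Int × Bool) :=
  match memo with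
  | [] => []
  | (k, v) :: rest => if k == x then v else pvGet rest x

-- A's recursion, totalized by a depth budget (Python recursion is unbounded;
-- memo.length + 1 levels suffice whenever the Python call returns, see Pre_)
def bexA (memo : List (Int × List (Int × Bool))) : Nat → Int → List Int
  | 0, _ => []
  | fuel+1, x =>
      (pvGet memo x).foldl
        (fun path p => if p.2 then path ++ bexA memo fuel p.1 ++ [x] else path)
        [x]

def build_branch_excursion_py (u : Int) (parent : Int) (graph : List (Int × List Int)) (path_decision_memo : List (Int × List (Int × Bool))) : List Int :=
  bexA path_decision_memo (path_decision_memo.length + 1) u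

-- ===== PORT B =====
-- termination helpers for B's while-loop (weights of the pending tokens)
def pvTotal (memo : List (Int × List (Int × Bool))) : Nat :=
  (memo.map (fun p => p.2.length)).sum

def pvK (memo : List (Int × List (Int × Bool))) : Nat := pvTotal memo + 2

def tokW (K : Nat) (t : Bool × Int × Nat) : Nat := if t.1 then K ^ (t.2.2 + 1) else 1

def workW (K : Nat) (work : List (Bool × Int × Nat)) : Nat := (work.map (tokW K)).sum

theorem workW_cons (K : Nat) (t : Bool × Int × Nat) (w : List (Bool × Int × Nat)) :
    workW K (t :: w) = tokW K t + workW K w := by simp [workW]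

theorem pvGet_len_le (memo : List (Int × List (Int × Bool))) (x : Int) :
    (pvGet memo x).length ≤ pvTotal memo := by
  induction memo with
  | nil => simp [pvGet, pvTotal]
  | cons h t ih =>
      simp only [pvGet, pvTotal, List.map_cons, List.sum_cons]
      split
      · exact Nat.le_add_right _ _
      · exact le_trans ih (Nat.le_add_left _ _)

theorem workW_push_le (K b : Nat) (x : Int) (L : List (Int × Bool)) (w : List (Bool × Int × Nat)) :
    workW K (L.foldl (fun w p => if p.2 then (true, p.1, b) :: (false, x, b) :: w else w) w)
      ≤ workW K w + L.length * (K ^ (b + 1) + 1) := by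
  induction L generalizing w with
  | nil => simp
  | cons p L ih =>
      cases hp : p.2
      · rw [List.foldl_cons, if_neg (by simp [hp])]
        simp only [List.length_cons, Nat.succ_mul]
        have := ih w
        omega
      · rw [List.foldl_cons, if_pos hp]
        simp only [List.length_cons, Nat.succ_mul]
        have h1 := ih ((true, p.1, b) :: (false, x, b) :: w)
        have h2 : workW K ((true, p.1, b) :: (false, x, b) :: w)
            = K ^ (b + 1) + 1 + workW K w := by
          simp [workW_cons, tokW]; ring
        rw [h2] at h1
        omega

theorem bexB_dec (memo : List (Int × List (Int × Bool))) (b : Nat) (x : Int)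
    (rest : List (Bool × Int × Nat)) :
    workW (pvK memo) ((pvGet memo x).reverse.foldl
        (fun w p => if p.2 then (true, p.1, b) :: (false, x, b) :: w else w) rest)
      < workW (pvK memo) ((true, x, b + 1) :: rest) := by
  have h1 := workW_push_le (pvK memo) b x (pvGet memo x).reverse rest
  have h2 : (pvGet memo x).reverse.length ≤ pvTotal memo := by
    simpa using pvGet_len_le memo x
  have hKdef : pvK memo = pvTotal memo + 2 := rfl
  have hP : pvK memo ≤ pvK memo ^ (b + 1) := Nat.le_self_pow (by omega) _
  have hstep : (pvGet memo x).reverse.length * (pvK memo ^ (b + 1) + 1)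
      < pvK memo ^ (b + 2) := by
    have hmul : (pvGet memo x).reverse.length * (pvK memo ^ (b + 1) + 1)
        ≤ pvTotal memo * (pvK memo ^ (b + 1) + 1) :=
      Nat.mul_le_mul_right _ h2
    have hpow : pvK memo ^ (b + 2) = pvK memo ^ (b + 1) * pvK memo := by
      rw [pow_succ]
    nlinarith [hP, hKdef, hmul, hpow]
  rw [workW_cons]
  have ht : tokW (pvK memo) (true, x, b + 1) = pvK memo ^ (b + 2) := by simp [tokW]
  rw [ht]
  omega

theorem tokW_pos (memo : List (Int × List (Int × Bool))) (t : Bool × Int × Nat) :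
    0 < tokW (pvK memo) t := by
  unfold tokW
  split
  · exact Nat.pow_pos (by simp [pvK])
  · omega

theorem workW_lt (memo : List (Int × List (Int × Bool))) (t : Bool × Int × Nat)
    (w : List (Bool × Int × Nat)) :
    workW (pvK memo) w < workW (pvK memo) (t :: w) := by
  rw [workW_cons]
  have := tokW_pos memo t
  omega

-- B's while-loop: pop a token from the stack; a visit token emits its node and
-- schedules the should_explore children (each followed by an emit/backtrack
-- token); an emit token just appends its node.
def bexBloop (memo : List (Int × List (Int × Bool))) : List (Bool × Int × Nat) → List Int → List Int
  | [], out => out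
  | (true, _, 0) :: rest, out => bexBloop memo rest out
  | (true, x, b+1) :: rest, out =>
      bexBloop memo
        ((pvGet memo x).reverse.foldl
          (fun w p => if p.2 then (true, p.1, b) :: (false, x, b) :: w else w) rest)
        (out ++ [x])
  | (false, x, _) :: rest, out => bexBloop memo rest (out ++ [x])
termination_by work _ => workW (pvK memo) work
decreasing_by
  · exact workW_lt memo _ _
  · exact bexB_dec memo b x rest
  · exact workW_lt memo _ _

def build_branch_excursion_py_alt (u : Int) (parent : Int) (graph : List (Int × List Int)) (path_decision_memo : List (Int × List (Int × Bool))) : List Int :=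
  bexBloop path_decision_memo [(true, u, path_decision_memo.length + 1)] []

-- ===== PRECONDITION & SPEC =====
-- reachability along should_explore edges, for Pre_
def pvChildren (memo : List (Int × List (Int × Bool))) (x : Int) : List Int :=
  ((pvGet memo x).filter (fun p => p.2)).map Prod.fst

def pvReach (memo : List (Int × List (Int × Bool))) : Nat → List Int → List Int
  | 0, s => s
  | n+1, s => ((pvReach memo n s) ++ (pvReach memo n s).flatMap (pvChildren memo)).dedup

-- Pre_ excludes exactly the inputs on which the Python recursion never returns
-- (a should_explore cycle reachable from u makes A raise RecursionError).
def Pre_build_branch_excursion_py (u : Int) (parent : Int) (graph : List (Int × List Int)) (path_decision_memo : List (Int × List (Int × Bool))) : Prop :=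
  ∀ k ∈ pvReach path_decision_memo path_decision_memo.length [u],
    k ∉ pvReach path_decision_memo path_decision_memo.length (pvChildren path_decision_memo k)
instance (u : Int) (parent : Int) (graph : List (Int × List Int)) (path_decision_memo : List (Int × List (Int × Bool))) : Decidable (Pre_build_branch_excursion_py u parent graph path_decision_memo) := by unfold Pre_build_branch_excursion_py; infer_instance

def pvWitness_build_branch_excursion_py : Int × Int × (List (Int × List Int)) × (List (Int × List (Int × Bool))) :=
  (1, 0, [], [(1, [(2, true), (3, false)]), (2, [(4, true)])])

def Spec_build_branch_excursion_py (u : Int) (parent : Int) (graph : List (Int × List Int)) (path_decision_memo : List (Int × List (Int × Bool))) (out : List Int) : Prop := out = build_branch_excursion_py_alt u parent graph path_decision_memo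
instance (u : Int) (parent : Int) (graph : List (Int × List Int)) (path_decision_memo : List (Int × List (Int × Bool))) (out : List Int) : Decidable (Spec_build_branch_excursion_py u parent graph path_decision_memo out) := by unfold Spec_build_branch_excursion_py; infer_instance

-- ===== CLAIM (what is proved, stated in full; the proofs are below) =====
def Claim_equal_build_branch_excursion_py : Prop := ∀ (u : Int) (parent : Int) (graph : List (Int × List Int)) (path_decision_memo : List (Int × List (Int × Bool))), Dom_build_branch_excursion_py u parent graph path_decision_memo → Pre_build_branch_excursion_py u parent graph path_decision_memo → Spec_build_branch_excursion_py u parent graph path_decision_memo (build_branch_excursion_py u parent graph path_decision_memo)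

-- ===== LEMMAS AND PROOFS =====

theorem bexB_nil (memo : List (Int × List (Int × Bool))) (out : List Int) :
    bexBloop memo [] out = out := by rw [bexBloop]

theorem bexB_emit (memo : List (Int × List (Int × Bool))) (x : Int) (b : Nat)
    (work : List (Bool × Int × Nat)) (out : List Int) :
    bexBloop memo ((false, x, b) :: work) out = bexBloop memo work (out ++ [x]) := by
  rw [bexBloop]

theorem foldl_step (memo : List (Int × List (Int × Bool))) (fuel : Nat) (x : Int)
    (L : List (Int × Bool)) (acc : List Int) :
    L.foldl (fun path p => if p.2 then path ++ bexA memo fuel p.1 ++ [x] else path) acc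
      = acc ++ L.flatMap (fun p => if p.2 then bexA memo fuel p.1 ++ [x] else []) := by
  induction L generalizing acc with
  | nil => simp
  | cons p L ih =>
      simp only [List.foldl_cons, List.flatMap_cons]
      cases hp : p.2
      · rw [if_neg Bool.false_ne_true, if_neg Bool.false_ne_true, ih]
        simp
      · rw [if_pos rfl, if_pos rfl, ih]
        simp [List.append_assoc]

-- closed form of A's loop body
theorem bexA_succ (memo : List (Int × List (Int × Bool))) (fuel : Nat) (x : Int) :
    bexA memo (fuel + 1) x
      = [x] ++ (pvGet memo x).flatMap
          (fun p => if p.2 then bexA memo fuel p.1 ++ [x] else []) := by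
  show (pvGet memo x).foldl _ [x] = _
  rw [foldl_step]

-- closed form of B's push loop
theorem push_closed (b : Nat) (x : Int) (L : List (Int × Bool)) (w : List (Bool × Int × Nat)) :
    L.reverse.foldl (fun w p => if p.2 then (true, p.1, b) :: (false, x, b) :: w else w) w
      = (L.flatMap (fun p => if p.2 then [(true, p.1, b), (false, x, b)] else [])) ++ w := by
  rw [List.foldl_reverse]
  induction L with
  | nil => simp
  | cons p L ih =>
      cases hp : p.2 <;> simp [hp, ih]

-- the main invariant: running a visit token appends exactly A's excursion
theorem bexB_run (memo : List (Int × List (Int × Bool))) :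
    ∀ (b : Nat) (x : Int) (work : List (Bool × Int × Nat)) (out : List Int),
      bexBloop memo ((true, x, b) :: work) out = bexBloop memo work (out ++ bexA memo b x) := by
  intro b
  induction b with
  | zero =>
      intro x work out
      rw [bexBloop]
      simp [bexA]
  | succ b ih =>
      intro x work out
      rw [bexBloop, push_closed, bexA_succ]
      generalize pvGet memo x = L
      induction L generalizing out with
      | nil => simp
      | cons p L ihL =>
          simp only [List.flatMap_cons]
          cases hp : p.2
          · rw [if_neg Bool.false_ne_true, if_neg Bool.false_ne_true]
            simpa using ihL out
          · rw [if_pos rfl, if_pos rfl]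
            simp only [List.cons_append, List.nil_append, List.append_assoc]
            rw [ih, bexB_emit]
            simpa [List.append_assoc] using ihL ((out ++ [x]) ++ bexA memo b p.1)

theorem bexAB (memo : List (Int × List (Int × Bool))) (u : Int) :
    bexA memo (memo.length + 1) u
      = bexBloop memo [(true, u, memo.length + 1)] [] := by
  rw [bexB_run, bexB_nil]
  simp

-- ===== VERDICT (by name: the statement is the Claim_ definition above) =====
theorem build_branch_excursion_py_spec : Claim_equal_build_branch_excursion_py := by
  intro u parent graph memo _ _
  show build_branch_excursion_py u parent graph memo
      = build_branch_excursion_py_alt u parent graph memo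
  exact bexAB memo u
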